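-- pv_equiv track=rewrite | github.com/shshrg/graphetc | diskretka.py | connected
-- ===== SOURCE A (Python) =====
-- def connected(graph:dict):
--     for apex_src in graph.keys():
--         for apex_dst in graph.keys():
--             if apex_src != apex_dst:
--                 n = find_path(graph, apex_src, apex_dst, [])
--                 m = find_path(graph, apex_dst, apex_src, [])
--                 if not n and not m:
--                     return False
--     return True
--
-- def find_path(graph:dict, src, dst, res:list):
--     res.append(src)
--     if src in graph.keys():
--         if dst in graph[src]:
--             return True
--         for apex in graph[src]:
--             if apex not in res:
--                 if find_path(graph, apex, dst, res):
--                     return True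
--     return False
-- ===== SOURCE B (Python) =====
-- def connected(graph: dict):
--     reach = {}
--     for u in graph:
--         for v in graph:
--             if u != v and v not in _reach(graph, reach, u) and u not in _reach(graph, reach, v):
--                 return False
--     return True
--
--
-- def _reach(graph, reach, u):
--     if u not in reach:
--         reach[u] = _reachable(graph, u)
--     return reach[u]
--
--
-- def _reachable(graph, u):
--     seen = {u}
--     stack = [u]
--     while stack:
--         x = stack.pop()
--         for y in graph.get(x, ()):
--             if y not in seen:
--                 seen.add(y)
--                 stack.append(y)
--     return seen
-- ===== Notes on version B (the rewrite author's own statement) =====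
-- stated objective: alternative
-- what changed: B answers each ordered pair by set-membership in per-vertex reachable sets computed on first demand (memoized) by an iterative stack-based search, instead of A's fresh recursive DFS in each direction for every pair of vertices.
import Mathlib
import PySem

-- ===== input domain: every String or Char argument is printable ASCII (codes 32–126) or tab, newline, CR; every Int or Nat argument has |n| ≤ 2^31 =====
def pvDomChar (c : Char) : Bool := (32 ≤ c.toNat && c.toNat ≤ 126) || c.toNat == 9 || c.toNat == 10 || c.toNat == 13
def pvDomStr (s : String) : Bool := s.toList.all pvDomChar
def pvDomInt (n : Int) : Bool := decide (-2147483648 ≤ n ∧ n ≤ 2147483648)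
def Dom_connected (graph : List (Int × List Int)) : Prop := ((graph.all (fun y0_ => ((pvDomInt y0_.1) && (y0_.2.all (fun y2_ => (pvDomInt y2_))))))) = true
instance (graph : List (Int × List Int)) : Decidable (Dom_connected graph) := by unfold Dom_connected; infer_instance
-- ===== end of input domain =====

-- B answers each ordered pair by set-membership in per-vertex reachable sets that
-- are computed on first demand (memoized) by an iterative stack-based search,
-- instead of A's fresh recursive DFS in each direction for every pair.

-- dict access graph[x] / graph.get(x): first-match lookup in the association list
-- (exact for a Python dict, whose keys are distinct)
def pvLookup (g : List (Int × List Int)) (x : Int) : Option (List Int) :=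
  match g with
  | [] => none
  | (k, v) :: rest => if k = x then some v else pvLookup rest x
def pvU (g : List (Int × List Int)) : List Int :=
  g.map Prod.fst ++ g.flatMap (fun p => p.2)
def pvFuel (g : List (Int × List Int)) : Nat := (pvU g).length + 1

-- recursion fuel for both searches; proved sufficient below, so the ports
-- compute exactly what the Pythons compute

-- ===== PORT A =====
-- the 'for apex in graph[src]' loop of find_path, threading the mutated res
def fpGo (fp : Int → List Int → Bool × List Int) :
    List Int → List Int → Bool × List Int
  | [], res => (false, res)
  | a :: rest, res =>
    if a ∈ res then fpGo fp rest res
    else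
      let p := fp a res
      if p.1 then (true, p.2) else fpGo fp rest p.2

-- find_path(graph, src, dst, res); returns (result, res after the mutation)
def fpAux (g : List (Int × List Int)) (dst : Int) :
    Nat → Int → List Int → Bool × List Int
  | 0, _, res => (false, res)
  | f + 1, src, res =>
    let res1 := res ++ [src]
    match pvLookup g src with
    | none => (false, res1)
    | some adj =>
      if dst ∈ adj then (true, res1)
      else fpGo (fpAux g dst f) adj res1

def connected (graph : List (Int × List Int)) : Bool :=
  let ks := graph.map Prod.fst
  ks.all fun u => ks.all fun v =>
    if u = v then true
    else
      let n := (fpAux graph v (pvFuel graph) u []).1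
      let m := (fpAux graph u (pvFuel graph) v []).1
      n || m

-- ===== PORT B =====
-- the 'for y in graph.get(x, ())' loop: push unseen neighbours, mark them seen
-- (python appends to the stack's end and pops from the end; the port keeps the
-- stack reversed — push = cons, pop = head — the same LIFO discipline)
def bfsPush (adj : List Int) (stack : List Int) (seen : PySem.Set Int) :
    List Int × PySem.Set Int :=
  adj.foldl
    (fun p y => if y ∈ p.2 then p else (y :: p.1, PySem.Set.add p.2 y))
    (stack, seen)

def bfsAux (g : List (Int × List Int)) :
    Nat → List Int → PySem.Set Int → PySem.Set Int
  | 0, _, seen => seen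
  | _ + 1, [], seen => seen
  | f + 1, x :: stack, seen =>
    let p := bfsPush ((pvLookup g x).getD []) stack seen
    bfsAux g f p.1 p.2

def pvReach (g : List (Int × List Int)) (u : Int) : PySem.Set Int :=
  bfsAux g (pvFuel g) [u] (PySem.Set.ofList [u])

-- _reach(graph, reach, u): memoized lookup (a new dict key is appended)
def pvGetReach (g : List (Int × List Int)) (cache : List (Int × List Int)) (u : Int) :
    List Int × List (Int × List Int) :=
  match pvLookup cache u with
  | some s => (s, cache)
  | none => (pvReach g u, cache ++ [(u, pvReach g u)])

-- the 'for v in graph:' loop, threading the memo dict; short-circuits like the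
-- python 'u != v and v not in r(u) and u not in r(v)'
def altInner (g : List (Int × List Int)) (u : Int) :
    List Int → List (Int × List Int) → Bool × List (Int × List Int)
  | [], c => (true, c)
  | v :: rest, c =>
    if u = v then altInner g u rest c
    else
      let p1 := pvGetReach g c u
      if PySem.Set.contains p1.1 v then altInner g u rest p1.2
      else
        let p2 := pvGetReach g p1.2 v
        if PySem.Set.contains p2.1 u then altInner g u rest p2.2
        else (false, p2.2)

-- the 'for u in graph:' loop
def altOuter (g : List (Int × List Int)) (ks : List Int) :
    List Int → List (Int × List Int) → Bool
  | [], _ => true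
  | u :: rest, c =>
    let p := altInner g u ks c
    if p.1 then altOuter g ks rest p.2 else false

def connected_alt (graph : List (Int × List Int)) : Bool :=
  let ks := graph.map Prod.fst
  altOuter graph ks ks []

-- ===== PRECONDITION & SPEC =====
def Spec_connected (graph : List (Int × List Int)) (out : Bool) : Prop := out = connected_alt graph
instance (graph : List (Int × List Int)) (out : Bool) : Decidable (Spec_connected graph out) := by unfold Spec_connected; infer_instance

-- ===== CLAIM (what is proved, stated in full; the proofs are below) =====
def Claim_equal_connected : Prop := ∀ (graph : List (Int × List Int)), Dom_connected graph → Spec_connected graph (connected graph)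

-- ===== LEMMAS AND PROOFS =====

-- adjacency as a total function, and the reachability relation both searches explore
def adjD (g : List (Int × List Int)) (x : Int) : List Int := (pvLookup g x).getD []
def cardRem (g : List (Int × List Int)) (res : List Int) : Nat :=
  ((pvU g).toFinset \ res.toFinset).card

lemma mem_pvU_of_adj {g : List (Int × List Int)} {x y : Int}
    (h : y ∈ adjD g x) : y ∈ pvU g := by
  have : ∃ p ∈ g, y ∈ p.2 := by
    induction g with
    | nil => simp [adjD, pvLookup] at h
    | cons p rest ih =>
      rcases p with ⟨k, v⟩
      simp only [adjD, pvLookup] at h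
      by_cases hk : k = x
      · rw [if_pos hk] at h
        exact ⟨(k, v), by simp, by simpa using h⟩
      · rw [if_neg hk] at h
        rcases ih h with ⟨q, hq, hyq⟩
        exact ⟨q, by simp [hq], hyq⟩
  rcases this with ⟨p, hp, hyp⟩
  exact List.mem_append.mpr (Or.inr (List.mem_flatMap.mpr ⟨p, hp, hyp⟩))

lemma cardRem_mono {g : List (Int × List Int)} {r1 r2 : List Int}
    (h : r1 ⊆ r2) : cardRem g r2 ≤ cardRem g r1 := by
  apply Finset.card_le_card
  intro a ha
  simp only [Finset.mem_sdiff, List.mem_toFinset] at *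
  exact ⟨ha.1, fun hm => ha.2 (h hm)⟩

lemma cardRem_append_lt {g : List (Int × List Int)} {res : List Int} {s : Int}
    (hU : s ∈ pvU g) (hnot : s ∉ res) : cardRem g (res ++ [s]) < cardRem g res := by
  apply Finset.card_lt_card
  constructor
  · intro a ha
    simp only [Finset.mem_sdiff, List.mem_toFinset, List.mem_append] at *
    exact ⟨ha.1, fun hm => ha.2 (Or.inl hm)⟩
  · intro hsub
    have : s ∈ (pvU g).toFinset \ res.toFinset := by
      simp [hU, hnot]
    have := hsub this
    simp at this
  
lemma cardRem_lt_fuel (g : List (Int × List Int)) : cardRem g [] < pvFuel g := by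
  have : ((pvU g).toFinset \ ([] : List Int).toFinset).card ≤ (pvU g).length := by
    calc ((pvU g).toFinset \ ([] : List Int).toFinset).card
        ≤ (pvU g).toFinset.card := Finset.card_le_card (Finset.sdiff_subset)
      _ ≤ (pvU g).length := List.toFinset_card_le _
  simpa [cardRem, pvFuel] using Nat.lt_succ_of_le this

lemma cardRem_cons_lt {g : List (Int × List Int)} {res : List Int} {s : Int}
    (hU : s ∈ pvU g) (hnot : s ∉ res) : cardRem g (s :: res) < cardRem g res := by
  apply Finset.card_lt_card
  constructor
  · intro a ha
    simp only [Finset.mem_sdiff, List.mem_toFinset, List.mem_cons] at *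
    exact ⟨ha.1, fun hm => ha.2 (Or.inr hm)⟩
  · intro hsub
    have : s ∈ (pvU g).toFinset \ res.toFinset := by simp [hU, hnot]
    have := hsub this
    simp at this

def Step (g : List (Int × List Int)) (a b : Int) : Prop := b ∈ adjD g a
def Reaches (g : List (Int × List Int)) (u v : Int) : Prop :=
  ∃ x, Relation.ReflTransGen (Step g) u x ∧ v ∈ adjD g x

lemma fpGo_subset {fp : Int → List Int → Bool × List Int}
    (hfp : ∀ a res, res ⊆ (fp a res).2) :
    ∀ l res, res ⊆ (fpGo fp l res).2 := by
  intro l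
  induction l with
  | nil => intro res; simp [fpGo]
  | cons a rest ih =>
    intro res
    simp only [fpGo]
    by_cases hm : a ∈ res
    · simpa [hm] using ih res
    · simp only [hm, if_false]
      by_cases hb : (fp a res).1
      · simpa [hb] using hfp a res
      · simp only [hb]
        exact (hfp a res).trans (ih _)

lemma fpAux_subset (g : List (Int × List Int)) (dst : Int) :
    ∀ f src res, res ⊆ (fpAux g dst f src res).2 := by
  intro f
  induction f with
  | zero => intro src res; simp [fpAux]
  | succ f ih =>
    intro src res
    simp only [fpAux]
    cases hl : pvLookup g src with
    | none => simp
    | some adj =>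
      by_cases hd : dst ∈ adj
      · simp [hd]
      · simp only [hd, if_false]
        exact (List.subset_append_left _ _).trans (fpGo_subset (fun a r => ih a r) adj _)

lemma fpAux_res1_subset (g : List (Int × List Int)) (dst : Int) (f : Nat) (src : Int)
    (res : List Int) : res ++ [src] ⊆ (fpAux g dst (f + 1) src res).2 := by
  simp only [fpAux]
  cases hl : pvLookup g src with
  | none => simp
  | some adj =>
    by_cases hd : dst ∈ adj
    · simp [hd]
    · simp only [hd, if_false]
      exact fpGo_subset (fun a r => fpAux_subset g dst f a r) adj _

lemma fpAux_mem_src (g : List (Int × List Int)) (dst : Int) (f : Nat) (src : Int)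
    (res : List Int) (hf : 0 < f) : src ∈ (fpAux g dst f src res).2 := by
  obtain ⟨f', rfl⟩ : ∃ f', f = f' + 1 := ⟨f - 1, by omega⟩
  exact fpAux_res1_subset g dst f' src res (by simp)

lemma fpGo_sound {fp : Int → List Int → Bool × List Int} {P : Int → Prop}
    (hfp : ∀ a res, (fp a res).1 = true → P a) :
    ∀ l res, (fpGo fp l res).1 = true → ∃ a ∈ l, P a := by
  intro l
  induction l with
  | nil => intro res h; simp [fpGo] at h
  | cons a rest ih =>
    intro res h
    simp only [fpGo] at h
    by_cases hm : a ∈ res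
    · rw [if_pos hm] at h
      rcases ih res h with ⟨b, hb, hP⟩
      exact ⟨b, by simp [hb], hP⟩
    · rw [if_neg hm] at h
      by_cases hb : (fp a res).1
      · exact ⟨a, by simp, hfp a res hb⟩
      · simp only [hb] at h
        rcases ih _ h with ⟨b, hbm, hP⟩
        exact ⟨b, by simp [hbm], hP⟩

lemma fpAux_sound (g : List (Int × List Int)) (dst : Int) :
    ∀ f src res, (fpAux g dst f src res).1 = true → Reaches g src dst := by
  intro f
  induction f with
  | zero => intro src res h; simp [fpAux] at h
  | succ f ih =>
    intro src res h
    simp only [fpAux] at h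
    cases hl : pvLookup g src with
    | none => rw [hl] at h; simp at h
    | some adj =>
      rw [hl] at h
      dsimp only at h
      by_cases hd : dst ∈ adj
      · exact ⟨src, Relation.ReflTransGen.refl, by simp [adjD, hl, hd]⟩
      · rw [if_neg hd] at h
        rcases fpGo_sound (fun a r => ih a r) adj _ h with ⟨a, ha, x, hrtg, hx⟩
        exact ⟨x, Relation.ReflTransGen.head (by simp [Step, adjD, hl, ha]) hrtg, hx⟩

def FpClosed (g : List (Int × List Int)) (dst : Int) (res res' : List Int) : Prop :=
  ∀ x ∈ res', x ∉ res → dst ∉ adjD g x ∧ ∀ y ∈ adjD g x, y ∈ res'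

lemma fpGo_closed (g : List (Int × List Int)) (dst : Int) (f : Nat)
    (hA : ∀ src res, src ∈ pvU g → src ∉ res → cardRem g res < f →
      (fpAux g dst f src res).1 = false → FpClosed g dst res (fpAux g dst f src res).2) :
    ∀ l res, (∀ a ∈ l, a ∈ pvU g) → cardRem g res < f →
      (fpGo (fpAux g dst f) l res).1 = false →
      (∀ a ∈ l, a ∈ (fpGo (fpAux g dst f) l res).2) ∧
        FpClosed g dst res (fpGo (fpAux g dst f) l res).2 := by
  intro l
  induction l with
  | nil =>
    intro res _ _ _
    refine ⟨by simp, ?_⟩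
    intro x hx hnx
    simp only [fpGo] at hx
    exact absurd hx hnx
  | cons a rest ih =>
    intro res hU hc hfalse
    by_cases hm : a ∈ res
    · have hrw : fpGo (fpAux g dst f) (a :: rest) res = fpGo (fpAux g dst f) rest res := by
        simp [fpGo, hm]
      rw [hrw] at hfalse ⊢
      rcases ih res (fun b hb => hU b (by simp [hb])) hc hfalse with ⟨hmem, hcl⟩
      refine ⟨?_, hcl⟩
      intro b hb
      rcases List.mem_cons.mp hb with rfl | hb'
      · exact fpGo_subset (fun a r => fpAux_subset g dst f a r) rest res hm
      · exact hmem b hb'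
    · have hf0 : 0 < f := by omega
      cases hp : (fpAux g dst f a res) with
      | mk b res2 =>
        cases b with
        | true =>
          exfalso
          have : fpGo (fpAux g dst f) (a :: rest) res = (true, res2) := by
            simp [fpGo, hm, hp]
          rw [this] at hfalse
          simp at hfalse
        | false =>
          have hrw : fpGo (fpAux g dst f) (a :: rest) res = fpGo (fpAux g dst f) rest res2 := by
            simp [fpGo, hm, hp]
          rw [hrw] at hfalse ⊢
          have haU : a ∈ pvU g := hU a (by simp)
          have hclA : FpClosed g dst res res2 := by
            have := hA a res haU hm hc (by rw [hp])
            rwa [hp] at this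
          have hsub : res ⊆ res2 := by
            have := fpAux_subset g dst f a res; rwa [hp] at this
          have hamem : a ∈ res2 := by
            have := fpAux_mem_src g dst f a res hf0; rwa [hp] at this
          have hc2 : cardRem g res2 < f := lt_of_le_of_lt (cardRem_mono hsub) hc
          rcases ih res2 (fun b hb => hU b (by simp [hb])) hc2 hfalse with ⟨hmem, hcl⟩
          have hsub2 : res2 ⊆ (fpGo (fpAux g dst f) rest res2).2 :=
            fpGo_subset (fun a r => fpAux_subset g dst f a r) rest res2
          refine ⟨?_, ?_⟩
          · intro b hb
            rcases List.mem_cons.mp hb with rfl | hb'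
            · exact hsub2 hamem
            · exact hmem b hb'
          · intro x hx hnx
            by_cases hx2 : x ∈ res2
            · rcases hclA x hx2 hnx with ⟨hd, hy⟩
              exact ⟨hd, fun y hy' => hsub2 (hy y hy')⟩
            · exact hcl x hx hx2

lemma fpAux_closed (g : List (Int × List Int)) (dst : Int) :
    ∀ f src res, src ∈ pvU g → src ∉ res → cardRem g res < f →
      (fpAux g dst f src res).1 = false → FpClosed g dst res (fpAux g dst f src res).2 := by
  intro f
  induction f with
  | zero => intro src res _ _ hc; omega
  | succ f ih =>
    intro src res hUsrc hnot hc hfalse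
    simp only [fpAux] at hfalse ⊢
    cases hl : pvLookup g src with
    | none =>
      rw [hl] at hfalse
      dsimp only at hfalse ⊢
      intro x hx hnx
      have hxs : x = src := by
        rcases List.mem_append.mp hx with h | h
        · exact absurd h hnx
        · simpa using h
      subst hxs
      simp [adjD, hl]
    | some adj =>
      rw [hl] at hfalse
      dsimp only at hfalse ⊢
      have hadjD : adjD g src = adj := by simp [adjD, hl]
      by_cases hd : dst ∈ adj
      · rw [if_pos hd] at hfalse; simp at hfalse
      · rw [if_neg hd] at hfalse ⊢
        have hadjU : ∀ a ∈ adj, a ∈ pvU g := by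
          intro a ha; exact mem_pvU_of_adj (x := src) (by rw [hadjD]; exact ha)
        have hc1 : cardRem g (res ++ [src]) < f := by
          have := cardRem_append_lt hUsrc hnot
          omega
        rcases fpGo_closed g dst f ih adj (res ++ [src]) hadjU hc1 hfalse with ⟨hmem, hcl⟩
        have hsub : res ++ [src] ⊆ (fpGo (fpAux g dst f) adj (res ++ [src])).2 :=
          fpGo_subset (fun a r => fpAux_subset g dst f a r) adj _
        intro x hx hnx
        by_cases hx1 : x ∈ res ++ [src]
        · have hxs : x = src := by
            rcases List.mem_append.mp hx1 with h | h
            · exact absurd h hnx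
            · simpa using h
          subst hxs
          rw [hadjD]
          exact ⟨hd, hmem⟩
        · exact hcl x hx hx1

lemma fpTop_iff {g : List (Int × List Int)} {u v : Int}
    (hu : u ∈ g.map Prod.fst) :
    (fpAux g v (pvFuel g) u []).1 = true ↔ Reaches g u v := by
  constructor
  · exact fpAux_sound g v (pvFuel g) u []
  · intro hre
    by_contra hfalse
    have hfalse' : (fpAux g v (pvFuel g) u []).1 = false := by
      cases hb : (fpAux g v (pvFuel g) u []).1
      · rfl
      · exact absurd hb hfalse
    have hUu : u ∈ pvU g := by
      exact List.mem_append.mpr (Or.inl hu)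
    have hcl : FpClosed g v [] (fpAux g v (pvFuel g) u []).2 :=
      fpAux_closed g v (pvFuel g) u [] hUu (by simp) (cardRem_lt_fuel g) hfalse'
    have humem : u ∈ (fpAux g v (pvFuel g) u []).2 :=
      fpAux_mem_src g v (pvFuel g) u [] (by simp [pvFuel])
    have hall : ∀ x, Relation.ReflTransGen (Step g) u x → x ∈ (fpAux g v (pvFuel g) u []).2 := by
      intro x hrtg
      induction hrtg with
      | refl => exact humem
      | tail _ hstep ihm => exact (hcl _ ihm (by simp)).2 _ hstep
    rcases hre with ⟨x, hrtg, hv⟩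
    exact (hcl x (hall x hrtg) (by simp)).1 hv

lemma bfsPush_cons (y : Int) (adj stack : List Int) (seen : PySem.Set Int) :
    bfsPush (y :: adj) stack seen =
      if y ∈ seen then bfsPush adj stack seen
      else bfsPush adj (y :: stack) (PySem.Set.add seen y) := by
  by_cases h : y ∈ seen <;> simp [bfsPush, List.foldl_cons, h]

lemma bfsPush_spec (g : List (Int × List Int)) :
    ∀ (adj stack : List Int) (seen : PySem.Set Int), (∀ y ∈ adj, y ∈ pvU g) →
    (∀ z ∈ seen, z ∈ (bfsPush adj stack seen).2) ∧
    (∀ z ∈ stack, z ∈ (bfsPush adj stack seen).1) ∧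
    (∀ y ∈ adj, y ∈ (bfsPush adj stack seen).2) ∧
    (∀ z ∈ (bfsPush adj stack seen).2, z ∈ seen ∨ z ∈ adj) ∧
    (∀ z ∈ (bfsPush adj stack seen).1, z ∈ stack ∨ z ∈ (bfsPush adj stack seen).2) ∧
    (∀ z ∈ (bfsPush adj stack seen).2, z ∈ seen ∨ z ∈ (bfsPush adj stack seen).1) ∧
    (bfsPush adj stack seen).1.length + cardRem g (bfsPush adj stack seen).2 ≤
      stack.length + cardRem g seen := by
  intro adj
  induction adj with
  | nil =>
    intro stack seen _
    refine ⟨by simp [bfsPush], by simp [bfsPush], by simp, by simp [bfsPush],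
      fun z hz => Or.inl (by simpa [bfsPush] using hz),
      fun z hz => Or.inl (by simpa [bfsPush] using hz), by simp [bfsPush]⟩
  | cons y adj ih =>
    intro stack seen hU
    rw [bfsPush_cons]
    by_cases hy : y ∈ seen
    · rw [if_pos hy]
      rcases ih stack seen (fun a ha => hU a (by simp [ha])) with
        ⟨h1, h2, h3, h4, h5, h6, h7⟩
      exact ⟨h1, h2, fun b hb => by
          rcases List.mem_cons.mp hb with rfl | hb'
          · exact h1 b hy
          · exact h3 b hb',
        fun z hz => by
          rcases h4 z hz with h | h
          · exact Or.inl h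
          · exact Or.inr (by simp [h]),
        h5, h6, h7⟩
    · rw [if_neg hy]
      rcases ih (y :: stack) (PySem.Set.add seen y) (fun a ha => hU a (by simp [ha])) with
        ⟨h1, h2, h3, h4, h5, h6, h7⟩
      have hyadd : y ∈ PySem.Set.add seen y := by
        rw [PySem.Set.mem_add]; exact Or.inr rfl
      have hseenadd : ∀ z ∈ seen, z ∈ PySem.Set.add seen y := by
        intro z hz; rw [PySem.Set.mem_add]; exact Or.inl hz
      refine ⟨fun z hz => h1 z (hseenadd z hz),
        fun z hz => h2 z (by simp [hz]),
        fun b hb => by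
          rcases List.mem_cons.mp hb with rfl | hb'
          · exact h1 b hyadd
          · exact h3 b hb',
        fun z hz => by
          rcases h4 z hz with h | h
          · rcases (PySem.Set.mem_add _ _ _).mp h with h' | h'
            · exact Or.inl h'
            · exact Or.inr (by simp [h'])
          · exact Or.inr (by simp [h]),
        fun z hz => by
          rcases h5 z hz with h | h
          · rcases List.mem_cons.mp h with rfl | h'
            · exact Or.inr (h1 z hyadd)
            · exact Or.inl h'
          · exact Or.inr h,
        fun z hz => by
          rcases h6 z hz with h | h
          · rcases (PySem.Set.mem_add _ _ _).mp h with h' | h'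
            · exact Or.inl h'
            · subst h'
              exact Or.inr (h2 z (by simp))
          · exact Or.inr h,
        ?_⟩
      have hadd : PySem.Set.add seen y = seen ++ [y] := PySem.Set.add_of_not_mem hy
      have hc : cardRem g (seen ++ [y]) < cardRem g seen :=
        cardRem_append_lt (hU y (by simp)) hy
      calc (bfsPush adj (y :: stack) (PySem.Set.add seen y)).1.length +
            cardRem g (bfsPush adj (y :: stack) (PySem.Set.add seen y)).2
          ≤ (y :: stack).length + cardRem g (PySem.Set.add seen y) := h7
        _ = stack.length + 1 + cardRem g (seen ++ [y]) := by simp [hadd]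
        _ ≤ stack.length + cardRem g seen := by omega

lemma bfsAux_sound (g : List (Int × List Int)) (u : Int) :
    ∀ f stack seen, (∀ w ∈ seen, Relation.ReflTransGen (Step g) u w) →
      (∀ w ∈ stack, w ∈ seen) →
      ∀ w ∈ bfsAux g f stack seen, Relation.ReflTransGen (Step g) u w := by
  intro f
  induction f with
  | zero => intro stack seen hseen _ w hw; exact hseen w hw
  | succ f ih =>
    intro stack seen hseen hstack w hw
    cases stack with
    | nil => exact hseen w hw
    | cons x stack =>
      simp only [bfsAux] at hw
      have hadjU : ∀ y ∈ (pvLookup g x).getD ([] : List Int), y ∈ pvU g :=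
        fun y hy => mem_pvU_of_adj (x := x) (by simpa [adjD] using hy)
      rcases bfsPush_spec g ((pvLookup g x).getD []) stack seen hadjU with
        ⟨h1, h2, h3, h4, h5, _, _⟩
      refine ih _ _ ?_ ?_ w hw
      · intro z hz
        rcases h4 z hz with h | h
        · exact hseen z h
        · exact Relation.ReflTransGen.tail (hseen x (hstack x (by simp)))
            (by simpa [Step, adjD] using h)
      · intro z hz
        rcases h5 z hz with h | h
        · exact h1 z (hstack z (by simp [h]))
        · exact h

lemma bfsAux_closed (g : List (Int × List Int)) :
    ∀ f stack seen, stack.length + cardRem g seen < f →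
      (∀ w ∈ seen, w ∈ stack ∨ ∀ y ∈ adjD g w, y ∈ seen) →
      (∀ w ∈ seen, w ∈ bfsAux g f stack seen) ∧
        (∀ w ∈ bfsAux g f stack seen, ∀ y ∈ adjD g w, y ∈ bfsAux g f stack seen) := by
  intro f
  induction f with
  | zero => intro stack seen hlen _; omega
  | succ f ih =>
    intro stack seen hlen hinv
    cases stack with
    | nil =>
      simp only [bfsAux]
      refine ⟨fun w hw => hw, ?_⟩
      intro w hw y hy
      rcases hinv w hw with h | h
      · simp at h
      · exact h y hy
    | cons x stack =>
      simp only [bfsAux]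
      have hadjU : ∀ y ∈ (pvLookup g x).getD ([] : List Int), y ∈ pvU g :=
        fun y hy => mem_pvU_of_adj (x := x) (by simpa [adjD] using hy)
      rcases bfsPush_spec g ((pvLookup g x).getD []) stack seen hadjU with
        ⟨h1, h2, h3, h4, h5, h6, h7⟩
      have hlen' : (bfsPush ((pvLookup g x).getD []) stack seen).1.length +
          cardRem g (bfsPush ((pvLookup g x).getD []) stack seen).2 < f := by
        simp only [List.length_cons] at hlen
        omega
      have hinv' : ∀ w ∈ (bfsPush ((pvLookup g x).getD []) stack seen).2,
          w ∈ (bfsPush ((pvLookup g x).getD []) stack seen).1 ∨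
          ∀ y ∈ adjD g w, y ∈ (bfsPush ((pvLookup g x).getD []) stack seen).2 := by
        intro w hw
        rcases h6 w hw with hws | hwp
        · rcases hinv w hws with hst | hcl
          · rcases List.mem_cons.mp hst with rfl | hst'
            · exact Or.inr fun y hy => h3 y (by simpa [adjD] using hy)
            · exact Or.inl (h2 w hst')
          · exact Or.inr fun y hy => h1 y (hcl y hy)
        · exact Or.inl hwp
      rcases ih _ _ hlen' hinv' with ⟨hm, hc⟩
      exact ⟨fun w hw => hm w (h1 w hw), hc⟩

lemma pvReach_iff {g : List (Int × List Int)} {u : Int}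
    (hu : u ∈ g.map Prod.fst) (v : Int) :
    v ∈ pvReach g u ↔ Relation.ReflTransGen (Step g) u v := by
  have hofl : PySem.Set.ofList [u] = [u] :=
    PySem.Set.ofList_eq_self_of_nodup [u] (List.nodup_singleton u)
  constructor
  · intro hv
    refine bfsAux_sound g u (pvFuel g) [u] (PySem.Set.ofList [u]) ?_ ?_ v hv
    · intro w hw
      rw [hofl] at hw
      rcases List.mem_singleton.mp hw with rfl
      exact Relation.ReflTransGen.refl
    · intro w hw
      rw [hofl]
      exact hw
  · intro hrtg
    have hUu : u ∈ pvU g := List.mem_append.mpr (Or.inl hu)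
    have hlen : ([u] : List Int).length + cardRem g (PySem.Set.ofList [u]) < pvFuel g := by
      rw [hofl]
      have h1 : cardRem g [u] < cardRem g ([] : List Int) := by
        simpa using cardRem_cons_lt (res := ([] : List Int)) hUu (by simp)
      have h2 := cardRem_lt_fuel g
      simp only [List.length_singleton]
      omega
    have hinv : ∀ w ∈ PySem.Set.ofList [u], w ∈ ([u] : List Int) ∨
        ∀ y ∈ adjD g w, y ∈ PySem.Set.ofList [u] := by
      intro w hw
      rw [hofl] at hw
      exact Or.inl hw
    rcases bfsAux_closed g (pvFuel g) [u] (PySem.Set.ofList [u]) hlen hinv with ⟨hm, hc⟩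
    have humem : u ∈ pvReach g u := hm u (by rw [hofl]; simp)
    induction hrtg with
    | refl => exact humem
    | tail _ hstep ihm => exact hc _ ihm _ hstep

lemma reaches_iff_rtg {g : List (Int × List Int)} {u v : Int} (hne : u ≠ v) :
    Reaches g u v ↔ Relation.ReflTransGen (Step g) u v := by
  constructor
  · rintro ⟨x, hrtg, hv⟩
    exact Relation.ReflTransGen.tail hrtg hv
  · intro hrtg
    rcases (Relation.ReflTransGen.cases_tail hrtg) with h | ⟨c, hrtg', hstep⟩
    · exact absurd h.symm hne
    · exact ⟨c, hrtg', hstep⟩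

lemma pvLookup_mem {c : List (Int × List Int)} {k : Int} {s : List Int}
    (h : pvLookup c k = some s) : (k, s) ∈ c := by
  induction c with
  | nil => simp [pvLookup] at h
  | cons p rest ih =>
    rcases p with ⟨k', v'⟩
    simp only [pvLookup] at h
    by_cases hk : k' = k
    · rw [if_pos hk] at h
      subst hk
      injection h with h'
      subst h'
      exact List.mem_cons_self
    · rw [if_neg hk] at h
      exact List.mem_cons_of_mem _ (ih h)

-- every memoized entry is the canonical reachable set
def CacheOK (g : List (Int × List Int)) (c : List (Int × List Int)) : Prop :=
  ∀ p ∈ c, p.2 = pvReach g p.1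

lemma pvGetReach_spec {g c : List (Int × List Int)} (hc : CacheOK g c) (u : Int) :
    (pvGetReach g c u).1 = pvReach g u ∧ CacheOK g (pvGetReach g c u).2 := by
  unfold pvGetReach
  cases h : pvLookup c u with
  | some s => exact ⟨hc _ (pvLookup_mem h), hc⟩
  | none =>
    refine ⟨rfl, ?_⟩
    intro p hp
    rcases List.mem_append.mp hp with h' | h'
    · exact hc p h'
    · rcases List.mem_singleton.mp h' with rfl
      rfl

-- the value each pair contributes, once the memo is seen through
def pairB (g : List (Int × List Int)) (u v : Int) : Bool :=
  if u = v then true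
  else PySem.Set.contains (pvReach g u) v || PySem.Set.contains (pvReach g v) u

lemma altInner_spec {g : List (Int × List Int)} (u : Int) :
    ∀ (vs : List Int) (c : List (Int × List Int)), CacheOK g c →
      (altInner g u vs c).1 = vs.all (pairB g u) ∧ CacheOK g (altInner g u vs c).2 := by
  intro vs
  induction vs with
  | nil => intro c hc; exact ⟨rfl, hc⟩
  | cons v rest ih =>
    intro c hc
    simp only [altInner]
    by_cases huv : u = v
    · rw [if_pos huv]
      rcases ih c hc with ⟨h1, h2⟩
      refine ⟨?_, h2⟩
      rw [h1]
      simp [pairB, huv]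
    · rw [if_neg huv]
      rcases pvGetReach_spec hc u with ⟨he1, hc1⟩
      by_cases hm1 : PySem.Set.contains (pvGetReach g c u).1 v
      · rw [if_pos hm1]
        rcases ih _ hc1 with ⟨h1, h2⟩
        refine ⟨?_, h2⟩
        rw [h1]
        have : pairB g u v = true := by
          simp only [pairB, if_neg huv]
          rw [he1] at hm1
          simp only [Bool.or_eq_true, PySem.Set.contains_iff]
          exact Or.inl (by simpa using hm1)
        simp [this]
      · rw [if_neg hm1]
        rcases pvGetReach_spec hc1 v with ⟨he2, hc2⟩
        by_cases hm2 : PySem.Set.contains (pvGetReach g (pvGetReach g c u).2 v).1 u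
        · rw [if_pos hm2]
          rcases ih _ hc2 with ⟨h1, h2⟩
          refine ⟨?_, h2⟩
          rw [h1]
          have : pairB g u v = true := by
            simp only [pairB, if_neg huv]
            rw [he2] at hm2
            simp only [Bool.or_eq_true, PySem.Set.contains_iff]
            exact Or.inr (by simpa using hm2)
          simp [this]
        · rw [if_neg hm2]
          refine ⟨?_, hc2⟩
          have : pairB g u v = false := by
            simp only [pairB, if_neg huv]
            rw [he1] at hm1
            rw [he2] at hm2
            simp at hm1 hm2
            simp [hm1, hm2]
          simp [this]

lemma altOuter_spec {g : List (Int × List Int)} (ks : List Int) :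
    ∀ (us : List Int) (c : List (Int × List Int)), CacheOK g c →
      altOuter g ks us c = us.all (fun u => ks.all (pairB g u)) := by
  intro us
  induction us with
  | nil => intro c _; rfl
  | cons u rest ih =>
    intro c hc
    simp only [altOuter]
    rcases altInner_spec u ks c hc with ⟨h1, h2⟩
    by_cases hp : (altInner g u ks c).1
    · rw [if_pos hp, ih _ h2]
      rw [hp] at h1
      simp [List.all_cons, ← h1]
    · rw [if_neg hp]
      simp only [Bool.not_eq_true] at hp
      rw [hp] at h1
      simp [List.all_cons, ← h1]

lemma pvAllCongr {l : List Int} {f h : Int → Bool}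
    (he : ∀ x ∈ l, f x = h x) : l.all f = l.all h := by
  induction l with
  | nil => rfl
  | cons a t ih =>
    simp only [List.all_cons, he a (by simp)]
    rw [ih fun x hx => he x (by simp [hx])]

lemma fp_eq_contains {g : List (Int × List Int)} {u v : Int}
    (hu : u ∈ g.map Prod.fst) (hne : u ≠ v) :
    (fpAux g v (pvFuel g) u []).1 = PySem.Set.contains (pvReach g u) v := by
  have hiff : ((fpAux g v (pvFuel g) u []).1 = true) ↔
      (PySem.Set.contains (pvReach g u) v = true) := by
    rw [fpTop_iff hu, PySem.Set.contains_iff, pvReach_iff hu, reaches_iff_rtg hne]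
  cases hA : (fpAux g v (pvFuel g) u []).1 with
  | true => exact (hiff.mp hA).symm
  | false =>
    cases hB : PySem.Set.contains (pvReach g u) v with
    | true => exact absurd (hiff.mpr hB) (by simp [hA])
    | false => rfl

lemma connected_eq (graph : List (Int × List Int)) :
    connected graph = connected_alt graph := by
  simp only [connected, connected_alt]
  rw [altOuter_spec (graph.map Prod.fst) (graph.map Prod.fst) [] (fun p hp => by simp at hp)]
  apply pvAllCongr
  intro u hu
  apply pvAllCongr
  intro v hv
  by_cases huv : u = v
  · simp [pairB, huv]
  · rw [if_neg huv]
    simp only [pairB, if_neg huv]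
    rw [fp_eq_contains hu huv, fp_eq_contains hv (Ne.symm huv)]

-- ===== VERDICT (by name: the statement is the Claim_ definition above) =====
theorem connected_spec : Claim_equal_connected := by
  intro graph _
  unfold Spec_connected
  exact connected_eq graph
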